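-- pv_equiv track=rewrite | github.com/arjnbli/algo-expert | greedy/tandemBicycle.py | tandemBicycle2
-- ===== SOURCE A (Python) =====
-- import heapq
--
-- def tandemBicycle2(redShirtSpeeds, blueShirtSpeeds, fastest):
--     # Write your code here.
--     heapq.heapify(redShirtSpeeds)
--     if fastest:
--         for i in range(len(blueShirtSpeeds)):
--             blueShirtSpeeds[i] *= -1
--         heapq.heapify(blueShirtSpeeds)
--     else:
--         heapq.heapify(blueShirtSpeeds)
--
--     totalSpeed = 0
--     while redShirtSpeeds and blueShirtSpeeds:
--         redShirtSpeed = heapq.heappop(redShirtSpeeds)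
--         blueShirtSpeed = heapq.heappop(blueShirtSpeeds)
--         if blueShirtSpeed < 0:
--             blueShirtSpeed *= -1
--         totalSpeed += max(redShirtSpeed, blueShirtSpeed)
--     return totalSpeed
-- ===== SOURCE B (Python) =====
-- def tandemBicycle2(redShirtSpeeds, blueShirtSpeeds, fastest):
--     # Sort-and-zip instead of heaps: pair the i-th slowest red with the i-th
--     # popped blue (blues pop in descending order when fastest, ascending
--     # otherwise).  The original flips any negative popped blue speed before
--     # taking the max, so each blue contributes its absolute value; abs()
--     # reproduces exactly that.  Return value only: the original empties its
--     # argument lists via heappop, B leaves them untouched.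
--     reds = sorted(redShirtSpeeds)
--     blues = sorted(blueShirtSpeeds, reverse=bool(fastest))
--     return sum(max(r, abs(b)) for r, b in zip(reds, blues))
-- ===== Notes on version B (the rewrite author's own statement) =====
-- stated objective: idiomatic
-- what changed: Replaces the two min-heaps and the heappop-until-empty while loop with one sort of each list (blue descending when fastest) and a single zip/sum pass; return value only: A empties its argument lists in place, B leaves them untouched.
import Mathlib
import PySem

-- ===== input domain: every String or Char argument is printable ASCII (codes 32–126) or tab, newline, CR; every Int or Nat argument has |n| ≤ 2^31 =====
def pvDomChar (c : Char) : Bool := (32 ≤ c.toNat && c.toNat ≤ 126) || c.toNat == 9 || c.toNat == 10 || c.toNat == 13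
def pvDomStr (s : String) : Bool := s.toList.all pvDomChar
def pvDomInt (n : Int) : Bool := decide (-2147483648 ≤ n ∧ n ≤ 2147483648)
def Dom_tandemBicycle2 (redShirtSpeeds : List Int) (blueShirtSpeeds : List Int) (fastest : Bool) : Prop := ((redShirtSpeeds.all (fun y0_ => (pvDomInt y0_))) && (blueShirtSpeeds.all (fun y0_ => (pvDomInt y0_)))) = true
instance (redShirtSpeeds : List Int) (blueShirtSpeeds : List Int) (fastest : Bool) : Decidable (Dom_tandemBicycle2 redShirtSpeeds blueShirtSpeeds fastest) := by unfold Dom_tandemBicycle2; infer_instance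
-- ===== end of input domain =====

-- B replaces A's two min-heaps (heapify + heappop-until-empty loop) with one sort
-- of each list and a single zip/sum pass (objective: idiomatic).  Return value
-- only: A empties its argument lists via heappop, B leaves them untouched.

-- ===== PORT A =====
-- heapq.heappop on a heapified Int list returns its minimum and leaves a heap of
-- the remaining elements; only the popped VALUES and the remaining multiset are
-- ever observed by A, so the heap is modelled exactly by min-extraction:
-- pvExtractMin m xs = (a minimum of m :: xs, the other elements).
def pvExtractMin : Int → List Int → Int × List Int
  | m, [] => (m, [])
  | m, x :: xs =>
      if x < m then ((pvExtractMin x xs).1, m :: (pvExtractMin x xs).2)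
      else ((pvExtractMin m xs).1, x :: (pvExtractMin m xs).2)

theorem pvExtractMin_length (m : Int) (l : List Int) :
    (pvExtractMin m l).2.length = l.length := by
  induction l generalizing m with
  | nil => rfl
  | cons x xs ih => simp only [pvExtractMin]; split <;> simp [ih]

-- the 'while redShirtSpeeds and blueShirtSpeeds' loop of A: pop the minimum of
-- each heap, flip a negative popped blue speed, accumulate the max.
def pvTbLoop : List Int → List Int → Int
  | [], _ => 0
  | _ :: _, [] => 0
  | r :: rs, b :: bs =>
      let redPop := pvExtractMin r rs
      let bluePop := pvExtractMin b bs
      let blueShirtSpeed := if bluePop.1 < 0 then bluePop.1 * (-1) else bluePop.1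
      max redPop.1 blueShirtSpeed + pvTbLoop redPop.2 bluePop.2
  termination_by r _ => r.length
  decreasing_by simp [pvExtractMin_length]

def tandemBicycle2 (redShirtSpeeds : List Int) (blueShirtSpeeds : List Int) (fastest : Bool) : Int :=
  -- heapq.heapify reorders in place (content unchanged); the for-loop over
  -- range(len(blueShirtSpeeds)) multiplying each entry by -1 is the map below.
  let blue := match fastest with
    | true => blueShirtSpeeds.map (fun x => x * (-1))
    | false => blueShirtSpeeds
  pvTbLoop redShirtSpeeds blue

-- ===== PORT B =====
def tandemBicycle2_alt (redShirtSpeeds : List Int) (blueShirtSpeeds : List Int) (fastest : Bool) : Int :=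
  let reds := PySem.List.sorted redShirtSpeeds (fun x => x) false
  let blues := PySem.List.sorted blueShirtSpeeds (fun x => x) fastest
  (((reds.zip blues).map (fun p => max p.1 |p.2|))).sum

-- ===== PRECONDITION & SPEC =====
def Spec_tandemBicycle2 (redShirtSpeeds : List Int) (blueShirtSpeeds : List Int) (fastest : Bool) (out : Int) : Prop := out = tandemBicycle2_alt redShirtSpeeds blueShirtSpeeds fastest
instance (redShirtSpeeds : List Int) (blueShirtSpeeds : List Int) (fastest : Bool) (out : Int) : Decidable (Spec_tandemBicycle2 redShirtSpeeds blueShirtSpeeds fastest out) := by unfold Spec_tandemBicycle2; infer_instance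

-- ===== CLAIM (what is proved, stated in full; the proofs are below) =====
def Claim_equal_tandemBicycle2 : Prop := ∀ (redShirtSpeeds : List Int) (blueShirtSpeeds : List Int) (fastest : Bool), Dom_tandemBicycle2 redShirtSpeeds blueShirtSpeeds fastest → Spec_tandemBicycle2 redShirtSpeeds blueShirtSpeeds fastest (tandemBicycle2 redShirtSpeeds blueShirtSpeeds fastest)

-- ===== LEMMAS AND PROOFS =====

-- pvExtractMin returns a rearrangement of its input …
theorem pvExtractMin_perm (m : Int) (l : List Int) :
    ((pvExtractMin m l).1 :: (pvExtractMin m l).2).Perm (m :: l) := by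
  induction l generalizing m with
  | nil => rfl
  | cons x xs ih =>
      simp only [pvExtractMin]; split
      · exact (List.Perm.swap m (pvExtractMin x xs).1 (pvExtractMin x xs).2).trans ((ih x).cons m)
      · exact (((List.Perm.swap x (pvExtractMin m xs).1 (pvExtractMin m xs).2).trans
          ((ih m).cons x)).trans (List.Perm.swap m x xs))

-- … whose first component is a least element.
theorem pvExtractMin_min (m : Int) (l : List Int) :
    ∀ y ∈ m :: l, (pvExtractMin m l).1 ≤ y := by
  induction l generalizing m with
  | nil => intro y hy; simp at hy; simp [pvExtractMin, hy]
  | cons x xs ih =>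
      intro y hy
      simp only [pvExtractMin]; split
      · rename_i hx
        rcases List.mem_cons.1 hy with h | h
        · subst h; exact le_of_lt (lt_of_le_of_lt (ih x x (by simp)) hx)
        · exact ih x y h
      · rename_i hx
        rcases List.mem_cons.1 hy with h | h
        · rw [h]; exact ih m m (by simp)
        · rcases List.mem_cons.1 h with h2 | h2
          · subst h2; exact le_trans (ih m m (by simp)) (not_lt.1 hx)
          · exact ih m y (by simp [h2])

-- on an already ascending list the minimum is the head and the rest the tail
theorem pvExtractMin_of_le (m : Int) (l : List Int) (h : ∀ x ∈ l, m ≤ x) :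
    pvExtractMin m l = (m, l) := by
  induction l generalizing m with
  | nil => rfl
  | cons x xs ih =>
      have hmx : ¬ x < m := not_lt.2 (h x (by simp))
      have := ih m (fun y hy => h y (by simp [hy]))
      simp [pvExtractMin, hmx, this]

-- the pop loop only sees the multiset content of the two heaps
theorem pvTbLoop_perm (r r' b b' : List Int) (hr : r.Perm r') (hb : b.Perm b') :
    pvTbLoop r b = pvTbLoop r' b' := by
  induction hn : r.length using Nat.strong_induction_on generalizing r r' b b' with
  | _ n ih =>
    cases r with
    | nil =>
      have h1 : r' = [] := by
        cases r' with
        | nil => rfl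
        | cons a l => simpa using hr.length_eq
      subst h1; simp [pvTbLoop]
    | cons x xs =>
      cases r' with
      | nil => simpa using hr.length_eq
      | cons x' xs' =>
        cases b with
        | nil =>
          have h2 : b' = [] := by
            cases b' with
            | nil => rfl
            | cons a l => simpa using hb.length_eq
          subst h2; simp [pvTbLoop]
        | cons y ys =>
          cases b' with
          | nil => simpa using hb.length_eq
          | cons y' ys' =>
            have hperm1 := pvExtractMin_perm x xs
            have hperm1' := pvExtractMin_perm x' xs'
            have hperm2 := pvExtractMin_perm y ys
            have hperm2' := pvExtractMin_perm y' ys'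
            -- the two popped minima agree
            have hm1 : (pvExtractMin x xs).1 ∈ x' :: xs' :=
              hr.mem_iff.1 (hperm1.mem_iff.1 (by simp))
            have hm1' : (pvExtractMin x' xs').1 ∈ x :: xs :=
              hr.symm.mem_iff.1 (hperm1'.mem_iff.1 (by simp))
            have hm2 : (pvExtractMin y ys).1 ∈ y' :: ys' :=
              hb.mem_iff.1 (hperm2.mem_iff.1 (by simp))
            have hm2' : (pvExtractMin y' ys').1 ∈ y :: ys :=
              hb.symm.mem_iff.1 (hperm2'.mem_iff.1 (by simp))
            have hv1 : (pvExtractMin x xs).1 = (pvExtractMin x' xs').1 :=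
              le_antisymm (pvExtractMin_min x xs _ hm1') (pvExtractMin_min x' xs' _ hm1)
            have hv2 : (pvExtractMin y ys).1 = (pvExtractMin y' ys').1 :=
              le_antisymm (pvExtractMin_min y ys _ hm2') (pvExtractMin_min y' ys' _ hm2)
            -- and the two rests are rearrangements of each other
            have hrest1 : (pvExtractMin x xs).2.Perm (pvExtractMin x' xs').2 := by
              have := (hperm1.trans hr).trans hperm1'.symm
              rwa [hv1, List.perm_cons] at this
            have hrest2 : (pvExtractMin y ys).2.Perm (pvExtractMin y' ys').2 := by
              have := (hperm2.trans hb).trans hperm2'.symm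
              rwa [hv2, List.perm_cons] at this
            have hlen : (pvExtractMin x xs).2.length < n := by
              rw [← hn]; simp [pvExtractMin_length]
            simp only [pvTbLoop]
            rw [hv1, hv2, ih _ hlen _ _ _ _ hrest1 hrest2 rfl]

-- on two ascending lists the pop loop is the zip/sum pass (x*-1 on a negative x is |x|)
theorem pvTbLoop_sorted (r b : List Int)
    (hr : r.Pairwise (· ≤ ·)) (hb : b.Pairwise (· ≤ ·)) :
    pvTbLoop r b = ((r.zip b).map (fun p => max p.1 |p.2|)).sum := by
  induction r generalizing b with
  | nil => simp [pvTbLoop]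
  | cons x xs ih =>
      cases b with
      | nil => simp [pvTbLoop]
      | cons y ys =>
          rw [List.pairwise_cons] at hr hb
          simp only [pvTbLoop, pvExtractMin_of_le x xs hr.1, pvExtractMin_of_le y ys hb.1,
            List.zip_cons_cons, List.map_cons, List.sum_cons, ih ys hr.2 hb.2]
          congr 1
          congr 1
          split
          · rename_i h; rw [abs_of_neg h]; ring
          · rename_i h; rw [abs_of_nonneg (not_lt.1 h)]

-- sorting the negated blues ascending is negating the blues sorted descending
theorem sorted_map_neg (b : List Int) :
    PySem.List.sorted (b.map (fun x => x * (-1))) (fun x => x) false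
      = (PySem.List.sorted b (fun x => x) true).map (fun x => x * (-1)) := by
  have hperm : (PySem.List.sorted (b.map (fun x => x * (-1))) (fun x => x) false).Perm
      ((PySem.List.sorted b (fun x => x) true).map (fun x => x * (-1))) :=
    (PySem.List.sorted_perm _ _ _).trans ((PySem.List.sorted_perm b _ _).map _).symm
  have h1 : (PySem.List.sorted (b.map (fun x => x * (-1))) (fun x => x) false).Pairwise
      (fun a c : Int => a ≤ c) := PySem.List.sorted_pairwise _ _
  have h2 : ((PySem.List.sorted b (fun x => x) true).map (fun x => x * (-1))).Pairwise
      (fun a c : Int => a ≤ c) := by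
    rw [List.pairwise_map]
    exact (PySem.List.sorted_pairwise_rev b (fun x => x)).imp
      (fun h => by simpa [mul_neg_one] using neg_le_neg h)
  exact hperm.eq_of_pairwise (fun a c _ _ hab hba => le_antisymm hab hba) h1 h2

-- the zip/sum pass only sees blue speeds through |·|
theorem zipsum_map_neg (r l : List Int) :
    ((r.zip (l.map (fun x => x * (-1)))).map (fun p => max p.1 |p.2|)).sum
      = ((r.zip l).map (fun p => max p.1 |p.2|)).sum := by
  induction r generalizing l with
  | nil => simp
  | cons x xs ih =>
      cases l with
      | nil => simp
      | cons y ys =>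
          simp only [List.map_cons, List.zip_cons_cons, List.sum_cons, ih ys]
          congr 2
          rw [mul_neg_one, abs_neg]

-- ===== VERDICT (by name: the statement is the Claim_ definition above) =====
theorem tandemBicycle2_spec : Claim_equal_tandemBicycle2 := by
  intro r b fastest _
  show tandemBicycle2 r b fastest = tandemBicycle2_alt r b fastest
  cases fastest with
  | false =>
      show pvTbLoop r b = _
      rw [pvTbLoop_perm r (PySem.List.sorted r (fun x => x) false)
            b (PySem.List.sorted b (fun x => x) false)
            (PySem.List.sorted_perm _ _ _).symm (PySem.List.sorted_perm _ _ _).symm,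
          pvTbLoop_sorted _ _ (PySem.List.sorted_pairwise _ _) (PySem.List.sorted_pairwise _ _)]
      rfl
  | true =>
      show pvTbLoop r (b.map (fun x => x * (-1))) = _
      rw [pvTbLoop_perm r (PySem.List.sorted r (fun x => x) false)
            (b.map (fun x => x * (-1)))
            (PySem.List.sorted (b.map (fun x => x * (-1))) (fun x => x) false)
            (PySem.List.sorted_perm _ _ _).symm (PySem.List.sorted_perm _ _ _).symm,
          pvTbLoop_sorted _ _ (PySem.List.sorted_pairwise _ _) (PySem.List.sorted_pairwise _ _),
          sorted_map_neg, zipsum_map_neg]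
      rfl
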